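-- pv_equiv track=rewrite | github.com/karlsen-technologies/smartkar-cano-new | docs/canbus-reverse-engineering/broadcast_analyzer.py | find_changing_bytes
-- ===== SOURCE A (Python) =====
-- from typing import Dict, List, Set, Tuple, Optional
--
-- def find_changing_bytes(patterns: List[List[int]]) -> List[int]:
--     """Find which byte positions change across patterns."""
--     if not patterns or len(patterns) < 2:
--         return []
--
--     max_len = max(len(p) for p in patterns)
--     changing = []
--
--     for i in range(max_len):
--         values = set()
--         for p in patterns:
--             if i < len(p):
--                 values.add(p[i])
--             else:
--                 values.add(None)
--
--         if len(values) > 1: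
--             changing.append(i)
--
--     return changing
-- ===== SOURCE B (Python) =====
-- from typing import List
--
-- def find_changing_bytes(patterns: List[List[int]]) -> List[int]:
--     """Find which byte positions change across patterns (reference-comparison strategy)."""
--     if not patterns or len(patterns) < 2:
--         return []
--
--     ref = patterns[0]
--     max_len = max(len(p) for p in patterns)
--     changing = set()
--
--     for p in patterns[1:]:
--         for i in range(max_len):
--             ref_val = ref[i] if i < len(ref) else None
--             p_val = p[i] if i < len(p) else None
--             if ref_val != p_val:
--                 changing.add(i)
--
--     return sorted(changing)
-- ===== Notes on version B (the rewrite author's own statement) =====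
-- stated objective: alternative
-- what changed: Replaces the position-major 'build a set of column values per byte position' scan with a pattern-major comparison of each non-reference pattern against patterns[0] (with None padding), marking differing positions in one set and returning them sorted.
import Mathlib
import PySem

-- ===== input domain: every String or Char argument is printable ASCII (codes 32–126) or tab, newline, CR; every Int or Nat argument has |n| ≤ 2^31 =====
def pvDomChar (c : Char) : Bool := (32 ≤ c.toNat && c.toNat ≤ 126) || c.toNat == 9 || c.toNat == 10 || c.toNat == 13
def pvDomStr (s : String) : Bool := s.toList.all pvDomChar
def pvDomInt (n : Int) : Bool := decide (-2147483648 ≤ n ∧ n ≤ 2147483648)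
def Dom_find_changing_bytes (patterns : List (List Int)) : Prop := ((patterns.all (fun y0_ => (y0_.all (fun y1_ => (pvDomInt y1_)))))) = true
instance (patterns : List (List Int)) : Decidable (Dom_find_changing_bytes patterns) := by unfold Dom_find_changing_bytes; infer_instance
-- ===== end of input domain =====

-- B replaces A's position-major "set of column values per byte position" scan by a pattern-major
-- comparison of every non-reference pattern against patterns[0] (None-padded), collecting the
-- differing positions in one set and returning them sorted; same cost, different decomposition.

-- ===== PORT A =====
def find_changing_bytes (patterns : List (List Int)) : List Int :=
  if patterns.length < 2 then []
  else
    -- max(len(p) for p in patterns): patterns is nonempty here, so foldl max 0 is Python's max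
    let maxLen : Nat := (patterns.map List.length).foldl max 0
    (List.range maxLen).foldl (fun (changing : List Int) (i : Nat) =>
      let values : PySem.Set (Option Int) :=
        patterns.foldl (fun s p => s.add p[i]?) PySem.Set.empty
      if 1 < PySem.Set.len values then changing ++ [(i : Int)] else changing) []

-- ===== PORT B =====
def find_changing_bytes_alt (patterns : List (List Int)) : List Int :=
  if patterns.length < 2 then []
  else
    let ref := patterns.headD []
    let maxLen : Nat := (patterns.map List.length).foldl max 0
    let changing : PySem.Set Int :=
      patterns.tail.foldl (fun s p =>
        (List.range maxLen).foldl (fun (s : PySem.Set Int) (i : Nat) =>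
          if ref[i]? ≠ p[i]? then s.add (i : Int) else s) s) PySem.Set.empty
    PySem.List.sorted changing (fun x => x)

-- ===== PRECONDITION & SPEC =====
def Spec_find_changing_bytes (patterns : List (List Int)) (out : List Int) : Prop := out = find_changing_bytes_alt patterns
instance (patterns : List (List Int)) (out : List Int) : Decidable (Spec_find_changing_bytes patterns out) := by unfold Spec_find_changing_bytes; infer_instance

-- ===== CLAIM (what is proved, stated in full; the proofs are below) =====
def Claim_equal_find_changing_bytes : Prop := ∀ (patterns : List (List Int)), Dom_find_changing_bytes patterns → Spec_find_changing_bytes patterns (find_changing_bytes patterns)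

-- ===== LEMMAS AND PROOFS =====

-- foldl over add-into-set equals ofList of the mapped list
theorem foldl_add_eq_ofList {α β : Type} [BEq α] [LawfulBEq α] (l : List β) (f : β → α) :
    l.foldl (fun s p => PySem.Set.add s (f p)) PySem.Set.empty = PySem.Set.ofList (l.map f) := by
  rw [PySem.Set.ofList_eq_foldl, List.foldl_map]
  rfl

-- two distinct members force length > 1
theorem one_lt_length_of_two_mem {α : Type} {s : List α} {x y : α}
    (hx : x ∈ s) (hy : y ∈ s) (hne : x ≠ y) : 1 < s.length := by
  match s with
  | [] => cases hx
  | [a] =>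
    simp only [List.mem_singleton] at hx hy
    exact absurd (hx.trans hy.symm) hne
  | a :: b :: t => simp [List.length]

-- a Nodup list whose members all equal a has length ≤ 1
theorem length_le_one_of_all_eq {α : Type} {s : List α} {a : α}
    (hnd : s.Nodup) (h : ∀ x ∈ s, x = a) : s.length ≤ 1 := by
  match s with
  | [] => simp
  | [b] => simp
  | b :: c :: t =>
    exfalso
    have hb : b = a := h b (by simp)
    have hc : c = a := h c (by simp)
    have := hnd
    simp [List.nodup_cons] at this
    exact this.1.1 (hb.trans hc.symm)

-- Python "len(set of column values) > 1" on a nonempty column ↔ some entry differs from the first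
theorem one_lt_ofList_cons {α : Type} [BEq α] [LawfulBEq α] (a : α) (xs : List α) :
    1 < (PySem.Set.ofList (a :: xs)).length ↔ ∃ x ∈ xs, x ≠ a := by
  constructor
  · intro h
    by_contra hno
    push_neg at hno
    have hall : ∀ x ∈ PySem.Set.ofList (a :: xs), x = a := by
      intro x hx
      rw [PySem.Set.mem_ofList] at hx
      rcases List.mem_cons.mp hx with h1 | h2
      · exact h1
      · exact hno x h2
    exact absurd (length_le_one_of_all_eq (PySem.Set.nodup_ofList _) hall) (by omega)
  · rintro ⟨x, hx, hne⟩
    exact one_lt_length_of_two_mem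
      ((PySem.Set.mem_ofList _ _).mpr (List.mem_cons_of_mem a hx))
      ((PySem.Set.mem_ofList _ _).mpr (List.mem_cons_self))
      hne

-- membership through a conditional-add fold
theorem mem_foldl_if_add {α β : Type} [BEq α] [LawfulBEq α]
    (l : List β) (c : β → Prop) [DecidablePred c] (f : β → α) (s : PySem.Set α) (x : α) :
    (x ∈ l.foldl (fun s b => if c b then PySem.Set.add s (f b) else s) s ↔
      x ∈ s ∨ ∃ b ∈ l, c b ∧ x = f b) := by
  induction l generalizing s with
  | nil => simp
  | cons b t ih =>
    simp only [List.foldl_cons]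
    by_cases hb : c b
    · simp only [if_pos hb, ih, PySem.Set.mem_add, List.mem_cons]
      constructor
      · rintro (⟨h | h⟩ | ⟨y, hy, hc, hx⟩)
        · exact Or.inl h
        · exact Or.inr ⟨b, Or.inl rfl, hb, h⟩
        · exact Or.inr ⟨y, Or.inr hy, hc, hx⟩
      · rintro (h | ⟨y, (rfl | hy), hc, hx⟩)
        · exact Or.inl (Or.inl h)
        · exact Or.inl (Or.inr hx)
        · exact Or.inr ⟨y, hy, hc, hx⟩
    · simp only [if_neg hb, ih, List.mem_cons]
      constructor
      · rintro (h | ⟨y, hy, hc, hx⟩)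
        · exact Or.inl h
        · exact Or.inr ⟨y, Or.inr hy, hc, hx⟩
      · rintro (h | ⟨y, (rfl | hy), hc, hx⟩)
        · exact Or.inl h
        · exact absurd hc hb
        · exact Or.inr ⟨y, hy, hc, hx⟩

-- a conditional-add fold preserves Nodup
theorem nodup_foldl_if_add {α β : Type} [BEq α] [LawfulBEq α]
    (l : List β) (c : β → Prop) [DecidablePred c] (f : β → α) (s : PySem.Set α)
    (hs : List.Nodup s) :
    List.Nodup (l.foldl (fun s b => if c b then PySem.Set.add s (f b) else s) s) := by
  induction l generalizing s with
  | nil => exact hs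
  | cons b t ih =>
    simp only [List.foldl_cons]
    by_cases hb : c b
    · rw [if_pos hb]; exact ih _ (PySem.Set.nodup_add _ _ hs)
    · rw [if_neg hb]; exact ih _ hs

-- membership in B's nested fold over the tail
theorem mem_changed (tail : List (List Int)) (ref : List Int) (n : Nat)
    (s : PySem.Set Int) (x : Int) :
    (x ∈ tail.foldl (fun s p =>
        (List.range n).foldl (fun (s : PySem.Set Int) (i : Nat) => if ref[i]? ≠ p[i]? then PySem.Set.add s (i : Int) else s) s)
        s ↔
      x ∈ s ∨ ∃ p ∈ tail, ∃ i, i < n ∧ ref[i]? ≠ p[i]? ∧ x = (i : Int)) := by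
  induction tail generalizing s with
  | nil => simp
  | cons p t ih =>
    simp only [List.foldl_cons, ih, List.mem_cons]
    rw [mem_foldl_if_add (List.range n) (fun i => ref[i]? ≠ p[i]?) (fun (i : Nat) => (i : Int)) s x]
    constructor
    · rintro (⟨h | ⟨i, hi, hc, hx⟩⟩ | ⟨q, hq, i, hi, hc, hx⟩)
      · exact Or.inl h
      · exact Or.inr ⟨p, Or.inl rfl, i, List.mem_range.mp hi, hc, hx⟩
      · exact Or.inr ⟨q, Or.inr hq, i, hi, hc, hx⟩
    · rintro (h | ⟨q, (rfl | hq), i, hi, hc, hx⟩)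
      · exact Or.inl (Or.inl h)
      · exact Or.inl (Or.inr ⟨i, List.mem_range.mpr hi, hc, hx⟩)
      · exact Or.inr ⟨q, hq, i, hi, hc, hx⟩

-- B's nested fold is Nodup
theorem nodup_changed (tail : List (List Int)) (ref : List Int) (n : Nat)
    (s : PySem.Set Int) (hs : List.Nodup s) :
    List.Nodup (tail.foldl (fun s p =>
      (List.range n).foldl (fun (s : PySem.Set Int) (i : Nat) => if ref[i]? ≠ p[i]? then PySem.Set.add s (i : Int) else s) s) s) := by
  induction tail generalizing s with
  | nil => exact hs
  | cons p t ih =>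
    exact ih _ (nodup_foldl_if_add (List.range n) (fun i => ref[i]? ≠ p[i]?) (fun (i : Nat) => (i : Int)) s hs)

-- ===== VERDICT (by name: the statement is the Claim_ definition above) =====
theorem find_changing_bytes_spec : Claim_equal_find_changing_bytes := by
  intro patterns _
  unfold Spec_find_changing_bytes find_changing_bytes find_changing_bytes_alt
  by_cases hlen : patterns.length < 2
  · simp [hlen]
  · rw [if_neg hlen, if_neg hlen]
    match patterns, hlen with
    | ref :: tail, hlen =>
      simp only [List.headD_cons, List.tail_cons]
      set n : Nat := (((ref :: tail).map List.length).foldl max 0) with hn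
      -- A's list as filter-map of the range
      have hA :
          (List.range n).foldl (fun (changing : List Int) (i : Nat) =>
            if 1 < PySem.Set.len ((ref :: tail).foldl (fun s p => PySem.Set.add s p[i]?) PySem.Set.empty)
            then changing ++ [(i : Int)] else changing) [] =
          (((List.range n).filter (fun i =>
              decide (1 < PySem.Set.len ((ref :: tail).foldl (fun s p => PySem.Set.add s p[i]?) PySem.Set.empty)))).map
            (fun (i : Nat) => (i : Int))) := by
        simpa using PySem.List.foldl_append_if
          (fun (i : Nat) => decide (1 < PySem.Set.len ((ref :: tail).foldl (fun s p => PySem.Set.add s p[i]?) PySem.Set.empty)))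
          (fun (i : Nat) => (i : Int)) (List.range n) []
      rw [hA]
      -- the filtered mapped range is strictly increasing
      have hpw : (((List.range n).filter (fun (i : Nat) =>
              decide (1 < PySem.Set.len ((ref :: tail).foldl (fun s p => PySem.Set.add s p[i]?) PySem.Set.empty)))).map
            (fun (i : Nat) => (i : Int))).Pairwise (· < ·) := by
        refine List.Pairwise.map _ ?_ (List.Pairwise.filter _ (List.pairwise_lt_range))
        intro a b hab
        exact_mod_cast hab
      -- the condition in A equals B's "some tail entry differs from ref at i"
      have hcond : ∀ i : Nat,
          (1 < PySem.Set.len ((ref :: tail).foldl (fun s p => PySem.Set.add s p[i]?) PySem.Set.empty)) ↔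
          ∃ p ∈ tail, ref[i]? ≠ p[i]? := by
        intro i
        rw [foldl_add_eq_ofList (ref :: tail) (fun p => p[i]?)]
        have hl : PySem.Set.len (PySem.Set.ofList ((ref :: tail).map (fun p => p[i]?))) =
            ((PySem.Set.ofList ((ref :: tail).map (fun p => p[i]?))).length : Int) := rfl
        rw [hl]
        have : (1 : Int) < ((PySem.Set.ofList ((ref :: tail).map (fun p => p[i]?))).length : Int) ↔
            1 < (PySem.Set.ofList ((ref :: tail).map (fun p => p[i]?))).length := by exact_mod_cast Iff.rfl
        rw [this, List.map_cons, one_lt_ofList_cons]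
        constructor
        · rintro ⟨x, hx, hne⟩
          rcases List.mem_map.mp hx with ⟨p, hp, rfl⟩
          exact ⟨p, hp, fun h => hne h.symm⟩
        · rintro ⟨p, hp, hne⟩
          exact ⟨p[i]?, List.mem_map.mpr ⟨p, hp, rfl⟩, fun h => hne h.symm⟩
      -- same members
      have hmem : ∀ x : Int,
          x ∈ (((List.range n).filter (fun i =>
              decide (1 < PySem.Set.len ((ref :: tail).foldl (fun s p => PySem.Set.add s p[i]?) PySem.Set.empty)))).map
            (fun (i : Nat) => (i : Int))) ↔
          x ∈ tail.foldl (fun s p =>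
              (List.range n).foldl (fun (s : PySem.Set Int) (i : Nat) => if ref[i]? ≠ p[i]? then PySem.Set.add s (i : Int) else s) s)
            PySem.Set.empty := by
        intro x
        rw [mem_changed tail ref n PySem.Set.empty x]
        simp only [List.mem_map, List.mem_filter, List.mem_range, decide_eq_true_eq,
          PySem.Set.empty, List.not_mem_nil, false_or]
        constructor
        · rintro ⟨i, ⟨hi, hc⟩, rfl⟩
          rcases (hcond i).mp hc with ⟨p, hp, hne⟩
          exact ⟨p, hp, i, hi, hne, rfl⟩
        · rintro ⟨p, hp, i, hi, hne, rfl⟩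
          exact ⟨i, ⟨hi, (hcond i).mpr ⟨p, hp, hne⟩⟩, rfl⟩
      -- permutation between A's list and B's set, then name the sorted order
      have hperm :
          (((List.range n).filter (fun i =>
              decide (1 < PySem.Set.len ((ref :: tail).foldl (fun s p => PySem.Set.add s p[i]?) PySem.Set.empty)))).map
            (fun (i : Nat) => (i : Int))).Perm
          (tail.foldl (fun s p =>
              (List.range n).foldl (fun (s : PySem.Set Int) (i : Nat) => if ref[i]? ≠ p[i]? then PySem.Set.add s (i : Int) else s) s)
            PySem.Set.empty) := by
        refine (List.perm_ext_iff_of_nodup ?_ ?_).mpr hmem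
        · exact (List.Nodup.filter _ (List.nodup_range)).map (fun a b h => by exact_mod_cast h)
        · exact nodup_changed tail ref n PySem.Set.empty (by simp [PySem.Set.empty])
      exact (PySem.List.sorted_eq_of_perm_of_pairwise_lt _ _ (fun x => x) hperm hpw).symm
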